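-- pv_equiv track=rewrite | github.com/n1cke1/winkers | src/winkers/graph.py | _find_passthrough_prefixes
-- ===== SOURCE A (Python) =====
-- def _find_passthrough_prefixes(paths: list[str]) -> dict[str, str]:
--     """For each top-level directory, find a passthrough prefix to strip.
--
--     A directory is passthrough when it contains exactly one subdirectory
--     and no source files at its level.  The function walks down until
--     that condition breaks and returns the accumulated prefix.
--
--     Returns ``{top_dir: prefix_with_trailing_slash}`` only for top dirs
--     that actually have a passthrough chain.
--     """
--     by_top: dict[str, list[str]] = {}
--     for p in paths:
--         parts = p.split("/")
--         if len(parts) > 1: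
--             by_top.setdefault(parts[0], []).append(p)
--
--     prefixes: dict[str, str] = {}
--     for top, files in by_top.items():
--         prefix = top + "/"
--         while True:
--             subdirs: set[str] = set()
--             has_files = False
--             for f in files:
--                 rest = f[len(prefix):]
--                 rest_parts = rest.split("/")
--                 if len(rest_parts) == 1:
--                     has_files = True
--                 else:
--                     subdirs.add(rest_parts[0])
--             if len(subdirs) == 1 and not has_files:
--                 prefix = prefix + next(iter(subdirs)) + "/"
--             else:
--                 break
--         if prefix != top + "/":
--             prefixes[top] = prefix
--     return prefixes
-- ===== SOURCE B (Python) =====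
-- def _find_passthrough_prefixes(paths: list[str]) -> dict[str, str]:
--     """For each top-level directory, find a passthrough prefix to strip.
--
--     Splits every path once, groups the component tails by top directory,
--     then does a component-wise descent per top directory.
--     """
--     by_top: dict[str, list[list[str]]] = {}
--     for p in paths:
--         parts = p.split("/")
--         if len(parts) > 1:
--             by_top.setdefault(parts[0], []).append(parts[1:])
--
--     prefixes: dict[str, str] = {}
--     for top, tails in by_top.items():
--         t0 = tails[0]
--         d = 0
--         while all(len(t) > d + 1 for t in tails) and all(t[d] == t0[d] for t in tails):
--             d += 1
--         if d:
--             prefixes[top] = top + "/" + "/".join(t0[:d]) + "/"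
--     return prefixes
-- ===== Notes on version B (the rewrite author's own statement) =====
-- stated objective: alternative
-- what changed: Paths are split into components once and each top-level group is descended by a component-wise depth counter over the precomputed tails, instead of re-slicing and re-splitting every path string at every level and collecting a set of subdirectories.
import Mathlib
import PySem

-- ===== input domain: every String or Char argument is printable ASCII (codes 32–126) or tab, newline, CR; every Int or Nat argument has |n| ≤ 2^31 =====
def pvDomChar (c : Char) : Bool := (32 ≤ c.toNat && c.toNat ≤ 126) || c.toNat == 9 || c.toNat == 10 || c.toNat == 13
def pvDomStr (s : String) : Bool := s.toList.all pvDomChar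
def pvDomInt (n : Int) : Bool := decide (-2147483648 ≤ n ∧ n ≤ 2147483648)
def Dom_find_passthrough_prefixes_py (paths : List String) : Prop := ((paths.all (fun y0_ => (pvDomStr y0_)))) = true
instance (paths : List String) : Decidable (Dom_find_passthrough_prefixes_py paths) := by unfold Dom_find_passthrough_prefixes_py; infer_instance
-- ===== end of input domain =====

-- B splits every path into components once and descends each top-level group by a component-wise
-- depth counter over the precomputed tails, instead of re-slicing and re-splitting all path
-- strings at every level and collecting a set of subdirectories.


-- ===== PORT A =====
-- p.split("/"): the separator "/" is nonempty, so Python's str.split never raises and split? is always `some`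
def pvSplitSlash (s : String) : List String := (PySem.Str.split? s "/").getD []

-- A's inner `while True` loop; the fuel is an upper bound on the number of iterations (the prefix
-- grows by at least one char per iteration and stays shorter than the longest file while looping)
def pvAWhile : Nat → List String → String → String
  | 0, _, pfx => pfx
  | fuel+1, files, pfx =>
      let step := files.foldl (fun (st : PySem.Set String × Bool) f =>
          let rest := PySem.Str.slice f (some (PySem.Str.len pfx)) none
          let rest_parts := pvSplitSlash rest
          if rest_parts.length == 1 then (st.1, true)
          else (PySem.Set.add st.1 (rest_parts.headD ""), st.2))
        (PySem.Set.empty, false)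
      -- next(iter(subdirs)) is only taken when the set is a singleton, so it is order-independent
      if step.1.length == 1 && !step.2 then
        pvAWhile fuel files (pfx ++ step.1.headD "" ++ "/")
      else pfx

def find_passthrough_prefixes_py (paths : List String) : List (String × String) :=
  let by_top : PySem.Dict String (List String) :=
    paths.foldl (fun d p =>
      let parts := pvSplitSlash p
      if parts.length > 1 then d.modify (parts.headD "") [] (fun fs => fs ++ [p]) else d)
      PySem.Dict.empty
  let prefixes : PySem.Dict String String :=
    by_top.items.foldl (fun pfs tf =>
      let fuel := (tf.2.foldl (fun m f => max m f.toList.length) 0) + 1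
      let pfx := pvAWhile fuel tf.2 (tf.1 ++ "/")
      if pfx ≠ tf.1 ++ "/" then pfs.insert tf.1 pfx else pfs)
      PySem.Dict.empty
  prefixes.items

-- ===== PORT B =====
-- B's `while all(...) and all(...): d += 1`; fuel len(t0) suffices because the first `all`
-- forces d + 1 < len(t0) whenever the loop advances
def pvBDepth (tails : List (List String)) (t0 : List String) : Nat → Nat → Nat
  | d, 0 => d
  | d, fuel+1 =>
      if tails.all (fun t => decide (d + 1 < t.length)) && tails.all (fun t => t.getD d "" == t0.getD d "")
      then pvBDepth tails t0 (d + 1) fuel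
      else d

def find_passthrough_prefixes_py_alt (paths : List String) : List (String × String) :=
  let by_top : PySem.Dict String (List (List String)) :=
    paths.foldl (fun d p =>
      let parts := pvSplitSlash p
      if parts.length > 1 then d.modify (parts.headD "") [] (fun ts => ts ++ [parts.drop 1]) else d)
      PySem.Dict.empty
  let prefixes : PySem.Dict String String :=
    by_top.items.foldl (fun pfs tt =>
      let t0 := tt.2.headD []
      let d := pvBDepth tt.2 t0 0 t0.length
      if d ≠ 0 then pfs.insert tt.1 (tt.1 ++ "/" ++ PySem.Str.join "/" (t0.take d) ++ "/") else pfs)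
      PySem.Dict.empty
  prefixes.items

-- ===== PRECONDITION & SPEC =====
def Spec_find_passthrough_prefixes_py (paths : List String) (out : List (String × String)) : Prop := out = find_passthrough_prefixes_py_alt paths
instance (paths : List String) (out : List (String × String)) : Decidable (Spec_find_passthrough_prefixes_py paths out) := by unfold Spec_find_passthrough_prefixes_py; infer_instance

-- ===== CLAIM (what is proved, stated in full; the proofs are below) =====
def Claim_equal_find_passthrough_prefixes_py : Prop := ∀ (paths : List String), Dom_find_passthrough_prefixes_py paths → Spec_find_passthrough_prefixes_py paths (find_passthrough_prefixes_py paths)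

-- ===== LEMMAS AND PROOFS =====

def pvSR : List Char → List (List Char)
  | [] => [[]]
  | c :: r => if c = '/' then [] :: pvSR r else (pvSR r).modifyHead (c :: ·)

theorem pvSR_ne_nil (l : List Char) : pvSR l ≠ [] := by
  cases l with
  | nil => simp [pvSR]
  | cons c r =>
    simp only [pvSR]
    split
    · simp
    · cases h : pvSR r with
      | nil => exact absurd h (pvSR_ne_nil r)
      | cons a t => simp [List.modifyHead]

theorem pvSplitOn_go_eq : ∀ (fuel : Nat) (l cur : List Char) (acc : List (List Char)),
    l.length < fuel →
    PySem.Chars.splitOn.go ['/'] fuel l cur acc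
      = acc.reverse ++ (pvSR l).modifyHead (cur.reverse ++ ·) := by
  intro fuel
  induction fuel with
  | zero => intro l cur acc h; omega
  | succ f ih =>
    intro l cur acc h
    cases l with
    | nil => simp [PySem.Chars.splitOn.go, pvSR]
    | cons c r =>
      by_cases hc : c = '/'
      · subst hc
        have h1 : List.isPrefixOf ['/'] ('/' :: r) = true := by simp [List.isPrefixOf]
        rw [PySem.Chars.splitOn.go]
        simp only [h1, if_pos]
        simp only [List.length_cons, List.drop_succ_cons, List.length_nil, List.drop_zero]
        rw [ih r [] (cur.reverse :: acc) (by simpa using Nat.lt_of_succ_lt_succ h)]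
        simp only [pvSR, List.modifyHead, List.reverse_cons, List.append_assoc,
          List.singleton_append]
        cases pvSR r <;> simp
      · have h1 : List.isPrefixOf ['/'] (c :: r) = false := by
          simp [List.isPrefixOf]; exact fun hh => absurd hh.symm hc
        rw [PySem.Chars.splitOn.go]
        simp only [h1]
        rw [if_neg (by simp)]
        rw [ih r (c :: cur) acc (by simpa using Nat.lt_of_succ_lt_succ h)]
        simp only [pvSR, if_neg hc]
        rw [List.modifyHead_modifyHead]
        congr 1
        cases hr : pvSR r with
        | nil => exact absurd hr (pvSR_ne_nil r)
        | cons a t => simp [List.modifyHead]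

theorem pvSplitOn_eq_pvSR (l : List Char) : PySem.Chars.splitOn l ['/'] = pvSR l := by
  rw [PySem.Chars.splitOn, pvSplitOn_go_eq (l.length + 1) l [] [] (by omega)]
  cases hr : pvSR l with
  | nil => exact absurd hr (pvSR_ne_nil l)
  | cons a t => simp [List.modifyHead]

theorem pvSR_noslash {p : List Char} (h : '/' ∉ p) : pvSR p = [p] := by
  induction p with
  | nil => rfl
  | cons c r ih =>
    have hc : ¬ c = '/' := by intro hh; exact h (hh ▸ List.mem_cons_self)
    rw [pvSR, if_neg hc, ih (fun hm => h (List.mem_cons_of_mem c hm))]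
    rfl

theorem pvSR_append {p : List Char} (r : List Char) (h : '/' ∉ p) :
    pvSR (p ++ '/' :: r) = p :: pvSR r := by
  induction p with
  | nil => simp [pvSR]
  | cons c q ih =>
    have hc : ¬ c = '/' := by intro hh; exact h (hh ▸ List.mem_cons_self)
    rw [List.cons_append, pvSR, if_neg hc, ih (fun hm => h (List.mem_cons_of_mem c hm))]
    rfl

theorem pv_join_pvSR (l : List Char) : PySem.Chars.join ['/'] (pvSR l) = l := by
  induction l with
  | nil => rfl
  | cons c r ih =>
    rw [pvSR]
    by_cases hc : c = '/'
    · subst hc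
      rw [if_pos rfl]
      cases hr : pvSR r with
      | nil => exact absurd hr (pvSR_ne_nil r)
      | cons a t =>
        rw [← ih, hr]
        simp [PySem.Chars.join, List.intercalate]
    · rw [if_neg hc]
      cases hr : pvSR r with
      | nil => exact absurd hr (pvSR_ne_nil r)
      | cons a t =>
        rw [← ih, hr]
        cases t with
        | nil => simp [PySem.Chars.join, List.intercalate, List.modifyHead]
        | cons b t' => simp [PySem.Chars.join, List.intercalate, List.modifyHead]

theorem pvSR_free (l : List Char) : ∀ p ∈ pvSR l, '/' ∉ p := by
  induction l with
  | nil => intro p hp; simp [pvSR] at hp; simp [hp]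
  | cons c r ih =>
    intro p hp
    rw [pvSR] at hp
    by_cases hc : c = '/'
    · rw [if_pos hc] at hp
      rcases List.mem_cons.mp hp with h1 | h2
      · simp [h1]
      · exact ih p h2
    · rw [if_neg hc] at hp
      cases hr : pvSR r with
      | nil => exact absurd hr (pvSR_ne_nil r)
      | cons a t =>
        rw [hr] at hp
        simp only [List.modifyHead] at hp
        rcases List.mem_cons.mp hp with h1 | h2
        · subst h1
          intro hm
          rcases List.mem_cons.mp hm with h3 | h4
          · exact hc h3.symm
          · exact ih a (hr ▸ List.mem_cons_self) h4
        · exact ih p (hr ▸ List.mem_cons_of_mem a h2)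

theorem pvSR_join {ps : List (List Char)} (hfree : ∀ p ∈ ps, '/' ∉ p) (hne : ps ≠ []) :
    pvSR (PySem.Chars.join ['/'] ps) = ps := by
  induction ps with
  | nil => exact absurd rfl hne
  | cons a t ih =>
    cases t with
    | nil => simpa [PySem.Chars.join, List.intercalate] using pvSR_noslash (hfree a List.mem_cons_self)
    | cons b t' =>
      have hj : PySem.Chars.join ['/'] (a :: b :: t') = a ++ '/' :: PySem.Chars.join ['/'] (b :: t') := by
        simp [PySem.Chars.join, List.intercalate]
      rw [hj, pvSR_append _ (hfree a List.mem_cons_self),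
        ih (fun p hp => hfree p (List.mem_cons_of_mem a hp)) (by simp)]

theorem pvSplitSlash_eq (s : String) : pvSplitSlash s = (pvSR s.toList).map String.ofList := by
  rw [pvSplitSlash, PySem.Str.split?, PySem.Chars.split?]
  have : ("/" : String).toList = ['/'] := rfl
  rw [this]
  simp [pvSplitOn_eq_pvSR]

-- recover the char pieces from a string-level split result
theorem pv_map_toList {l : List (List Char)} {m : List String}
    (h : l.map String.ofList = m) : l = m.map String.toList := by
  subst h; simp [List.map_map, Function.comp_def]

def pvPrefChars (top : String) (t0 : List String) (d : Nat) : List Char :=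
  PySem.Chars.join ['/'] ((top :: t0.take d).map String.toList) ++ ['/']

theorem pv_join_append (l1 l2 : List (List Char)) (h1 : l1 ≠ []) (h2 : l2 ≠ []) :
    PySem.Chars.join ['/'] (l1 ++ l2)
      = PySem.Chars.join ['/'] l1 ++ '/' :: PySem.Chars.join ['/'] l2 := by
  induction l1 with
  | nil => exact absurd rfl h1
  | cons a t ih =>
    cases t with
    | nil =>
      cases l2 with
      | nil => exact absurd rfl h2
      | cons b t2 => simp [PySem.Chars.join, List.intercalate]
    | cons b t' =>
      have : PySem.Chars.join ['/'] ((a :: b :: t') ++ l2)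
          = a ++ '/' :: PySem.Chars.join ['/'] ((b :: t') ++ l2) := by
        simp [PySem.Chars.join, List.intercalate]
      rw [this, ih (by simp)]
      simp [PySem.Chars.join, List.intercalate]

-- per-file: slicing off the current prefix and splitting gives the remaining components
theorem pv_restparts (top : String) (t0 : List String) (d : Nat) (f : String) (t : List String)
    (hsp : pvSplitSlash f = top :: t) (hd : d < t.length) (htk : t.take d = t0.take d) :
    pvSplitSlash (PySem.Str.slice f (some (PySem.Str.len (String.ofList (pvPrefChars top t0 d)))) none)
      = t.drop d := by
  have hparts : pvSR f.toList = (top :: t).map String.toList := by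
    apply pv_map_toList
    rw [← pvSplitSlash_eq, hsp]
  have hfree : ∀ p ∈ (top :: t).map String.toList, '/' ∉ p := by
    rw [← hparts]; exact pvSR_free f.toList
  have hf : f.toList = PySem.Chars.join ['/'] ((top :: t).map String.toList) := by
    rw [← hparts, pv_join_pvSR]
  have hdecomp : (top :: t).map String.toList
      = ((top :: t.take d).map String.toList) ++ ((t.drop d).map String.toList) := by
    conv_lhs => rw [← List.take_append_drop d t]
    simp
  have hdrop_ne : t.drop d ≠ [] := by
    intro hh
    have := List.length_drop (l := t) (i := d)
    rw [hh] at this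
    simp at this
    omega
  have hsplit2 : f.toList = pvPrefChars top t0 d ++ PySem.Chars.join ['/'] ((t.drop d).map String.toList) := by
    rw [hf, hdecomp, pv_join_append _ _ (by simp) (by simpa using hdrop_ne), pvPrefChars, htk]
    simp
  have hlen : PySem.Str.len (String.ofList (pvPrefChars top t0 d)) = ((pvPrefChars top t0 d).length : Int) := by
    simp [PySem.Str.len]
  have hslice : (PySem.Str.slice f (some (PySem.Str.len (String.ofList (pvPrefChars top t0 d)))) none).toList
      = PySem.Chars.join ['/'] ((t.drop d).map String.toList) := by
    rw [PySem.Str.slice, String.toList_ofList, hlen, PySem.Chars.slice_eq_listSlice,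
      PySem.List.slice_from _ (by positivity), Int.toNat_natCast, hsplit2, List.drop_left]
  rw [pvSplitSlash_eq, hslice, pvSR_join (fun p hp => by
      refine hfree p ?_
      rw [hdecomp]
      exact List.mem_append_right _ hp) (by simpa using hdrop_ne)]
  simp [List.map_map, Function.comp_def]

theorem pv_headD_drop (l : List String) (d : Nat) : (l.drop d).headD "" = l.getD d "" := by
  rw [List.headD_eq_head?_getD, List.head?_drop]; simp [List.getD_eq_getElem?_getD]

theorem pv_take_succ_getD {l : List String} {d : Nat} (h : d < l.length) :
    l.take (d+1) = l.take d ++ [l.getD d ""] := by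
  rw [List.take_add_one]; simp [List.getElem?_eq_getElem h, List.getD]

theorem pv_ofList_const {v : String} {xs : List String} (h1 : xs ≠ []) (h2 : ∀ x ∈ xs, x = v) :
    PySem.Set.ofList xs = [v] := by
  have hnd : (PySem.Set.ofList xs).Nodup := PySem.Set.nodup_ofList xs
  have hmem : ∀ x, x ∈ PySem.Set.ofList xs ↔ x ∈ xs := fun x => PySem.Set.mem_ofList xs x
  cases hof : PySem.Set.ofList xs with
  | nil =>
    cases xs with
    | nil => exact absurd rfl h1
    | cons a t =>
      have : a ∈ PySem.Set.ofList (a :: t) := (hmem a).mpr List.mem_cons_self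
      rw [hof] at this; simp at this
  | cons b rest =>
    have hb : b = v := h2 b ((hmem b).mp (hof ▸ List.mem_cons_self))
    cases rest with
    | nil => rw [hb]
    | cons c r2 =>
      have hc : c = v := h2 c ((hmem c).mp (hof ▸ List.mem_cons_of_mem b List.mem_cons_self))
      rw [hof] at hnd
      rcases List.nodup_cons.mp hnd with ⟨hnb, _⟩
      exact absurd (hb.trans hc.symm) (fun hh => hnb (hh ▸ List.mem_cons_self))

theorem pv_set_two_ne {a b : String} {xs : List String} (ha : a ∈ PySem.Set.ofList xs)
    (hb : b ∈ PySem.Set.ofList xs) (hab : a ≠ b) : (PySem.Set.ofList xs).length ≠ 1 := by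
  intro hlen
  cases hof : PySem.Set.ofList xs with
  | nil => rw [hof] at hlen; simp at hlen
  | cons x rest =>
    rw [hof] at hlen
    simp at hlen
    rw [hlen] at hof
    rw [hof] at ha hb
    simp at ha hb
    exact hab (ha.trans hb.symm)

theorem pv_step (top : String) (fs : List String) (t0 : List String) (d : Nat)
    (hsp : ∀ f ∈ fs, pvSplitSlash f = top :: (pvSplitSlash f).drop 1)
    (hlt : ∀ f ∈ fs, d < ((pvSplitSlash f).drop 1).length)
    (htk : ∀ f ∈ fs, ((pvSplitSlash f).drop 1).take d = t0.take d) :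
    fs.foldl (fun (st : PySem.Set String × Bool) f =>
        let rest := PySem.Str.slice f (some (PySem.Str.len (String.ofList (pvPrefChars top t0 d)))) none
        let rest_parts := pvSplitSlash rest
        if rest_parts.length == 1 then (st.1, true)
        else (PySem.Set.add st.1 (rest_parts.headD ""), st.2))
      (PySem.Set.empty, false)
    = (PySem.Set.ofList ((fs.filter (fun f => !((pvSplitSlash f).drop 1).length == d + 1)).map
          (fun f => ((pvSplitSlash f).drop 1).getD d "")),
       fs.any (fun f => ((pvSplitSlash f).drop 1).length == d + 1)) := by
  rw [PySem.List.foldl_congr_mem fs _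
    (fun (st : PySem.Set String × Bool) f =>
      (if ((pvSplitSlash f).drop 1).length == d + 1 then st.1
          else PySem.Set.add st.1 (((pvSplitSlash f).drop 1).getD d ""),
       if ((pvSplitSlash f).drop 1).length == d + 1 then true else st.2))
    _ ?_]
  · rw [PySem.List.foldl_prod_mk
      (f := fun (s : PySem.Set String) f => if ((pvSplitSlash f).drop 1).length == d + 1 then s
          else PySem.Set.add s (((pvSplitSlash f).drop 1).getD d ""))
      (g := fun (b : Bool) f => if ((pvSplitSlash f).drop 1).length == d + 1 then true else b)]
    rw [PySem.List.foldl_if_true_eq]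
    refine Prod.ext ?_ (by simp)
    simp only
    rw [PySem.List.foldl_congr_mem fs _
      (fun (s : PySem.Set String) f =>
        if (!((pvSplitSlash f).drop 1).length == d + 1) then PySem.Set.add s (((pvSplitSlash f).drop 1).getD d "") else s)
      _ (by
        intro acc f hf
        cases hc : (((pvSplitSlash f).drop 1).length == d + 1) <;>
          simp only [hc, Bool.not_false, Bool.not_true, if_true, if_false, Bool.false_eq_true])]
    rw [PySem.List.foldl_if_eq_foldl_filter, ← PySem.Set.update_map_eq_foldl_add,
      PySem.Set.update_empty]
  · intro acc f hf
    have hrp : pvSplitSlash (PySem.Str.slice f (some (PySem.Str.len (String.ofList (pvPrefChars top t0 d)))) none)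
        = ((pvSplitSlash f).drop 1).drop d :=
      pv_restparts top t0 d f _ (hsp f hf) (hlt f hf) (htk f hf)
    simp only [hrp]
    have hlen : (((pvSplitSlash f).drop 1).drop d).length = ((pvSplitSlash f).drop 1).length - d := by
      rw [List.length_drop]
    by_cases hc : ((pvSplitSlash f).drop 1).length = d + 1
    · have h1 : ((((pvSplitSlash f).drop 1).drop d).length == 1) = true := by
        rw [hlen, hc]; simp
      have h2 : (((pvSplitSlash f).drop 1).length == d + 1) = true := beq_iff_eq.mpr hc
      simp only [h1, h2, if_true]
    · have h1 : ((((pvSplitSlash f).drop 1).drop d).length == 1) = false := by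
        rw [hlen]
        have := hlt f hf
        simp only [beq_eq_false_iff_ne]
        omega
      have h2 : (((pvSplitSlash f).drop 1).length == d + 1) = false := beq_eq_false_iff_ne.mpr hc
      simp only [h1, h2, if_false, Bool.false_eq_true, pv_headD_drop]

theorem pv_pref_succ (top : String) (t0 : List String) (d : Nat) (hd : d < t0.length) :
    String.ofList (pvPrefChars top t0 d) ++ t0.getD d "" ++ "/"
      = String.ofList (pvPrefChars top t0 (d+1)) := by
  rw [← String.toList_inj]
  have h1 : (top :: t0.take (d+1)).map String.toList
      = ((top :: t0.take d).map String.toList) ++ [(t0.getD d "").toList] := by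
    rw [pv_take_succ_getD hd]
    simp
  rw [String.toList_append, String.toList_append, String.toList_ofList, pvPrefChars, pvPrefChars,
    h1, pv_join_append _ _ (by simp) (by simp)]
  have : ("/" : String).toList = ['/'] := rfl
  rw [this]
  simp [PySem.Chars.join, List.intercalate]

theorem pv_ML (top : String) (fs : List String) (t0 : List String)
    (hne : fs ≠ [])
    (ht0 : t0 = (pvSplitSlash (fs.headD "")).drop 1)
    (hsp : ∀ f ∈ fs, pvSplitSlash f = top :: (pvSplitSlash f).drop 1) :
    ∀ (fuel d : Nat),
    (∀ f ∈ fs, d < ((pvSplitSlash f).drop 1).length) →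
    (∀ f ∈ fs, ((pvSplitSlash f).drop 1).take d = t0.take d) →
    t0.length - d < fuel →
    pvAWhile fuel fs (String.ofList (pvPrefChars top t0 d))
      = String.ofList (pvPrefChars top t0
          (pvBDepth (fs.map (fun f => (pvSplitSlash f).drop 1)) t0 d (t0.length - d))) := by
  intro fuel
  induction fuel with
  | zero => intro d _ _ hlt0; omega
  | succ fu ih =>
    intro d hlt htk hfuel
    obtain ⟨f0, fs', rfl⟩ : ∃ f0 fs', fs = f0 :: fs' := by
      cases fs with
      | nil => exact absurd rfl hne
      | cons a b => exact ⟨a, b, rfl⟩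
    have ht0' : t0 = (pvSplitSlash f0).drop 1 := by simpa using ht0
    have hd_t0 : d < t0.length := ht0' ▸ hlt f0 List.mem_cons_self
    rw [pvAWhile]
    simp only
    rw [pv_step top _ t0 d hsp hlt htk]
    cases hany : ((f0 :: fs').any (fun f => ((pvSplitSlash f).drop 1).length == d + 1)) with
    | true =>
      -- some file sits exactly at this level: both loops stop at depth d
      have hB : pvBDepth ((f0 :: fs').map (fun f => (pvSplitSlash f).drop 1)) t0 d (t0.length - d) = d := by
        rcases List.any_eq_true.mp hany with ⟨f, hf, hlen⟩
        have hc1 : (((f0 :: fs').map (fun f => (pvSplitSlash f).drop 1)).all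
            (fun t => decide (d + 1 < t.length))) = false := by
          rw [List.all_map]
          refine List.all_eq_false.mpr ⟨f, hf, fun hcon => ?_⟩
          simp only [Function.comp_apply, decide_eq_true_eq] at hcon
          have := beq_iff_eq.mp hlen
          omega
        cases hfb : t0.length - d with
        | zero => rw [pvBDepth]
        | succ n => rw [pvBDepth, hc1]; simp
      rw [hB]
      simp
    | false =>
      have hall : ∀ f ∈ (f0 :: fs'), d + 1 < ((pvSplitSlash f).drop 1).length := by
        intro f hf
        have h1 := List.any_eq_false.mp hany f hf
        have h2 := hlt f hf
        simp only [beq_iff_eq] at h1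
        omega
      have hfilter : ((f0 :: fs').filter (fun f => !((pvSplitSlash f).drop 1).length == d + 1))
          = f0 :: fs' := by
        refine List.filter_eq_self.mpr ?_
        intro f hf
        have := hall f hf
        simp only [Bool.not_eq_eq_eq_not, Bool.not_true, beq_eq_false_iff_ne]
        omega
      rw [hfilter]
      by_cases heq : ∀ f ∈ (f0 :: fs'), ((pvSplitSlash f).drop 1).getD d "" = t0.getD d ""
      · -- all files agree on the next component: both loops descend
        have hofl : PySem.Set.ofList (((f0 :: fs')).map (fun f => ((pvSplitSlash f).drop 1).getD d ""))
            = [t0.getD d ""] := by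
          refine pv_ofList_const (by simp) ?_
          intro x hx
          rcases List.mem_map.mp hx with ⟨f, hf, rfl⟩
          exact heq f hf
        rw [hofl]
        simp only [List.length_cons, List.length_nil, beq_self_eq_true, Bool.not_false,
          Bool.and_true, List.headD_cons, if_true, Nat.zero_add]
        have hstep : (String.ofList (pvPrefChars top t0 d)) ++ t0.getD d "" ++ "/"
            = String.ofList (pvPrefChars top t0 (d+1)) := pv_pref_succ top t0 d hd_t0
        rw [hstep]
        have htk' : ∀ f ∈ (f0 :: fs'), ((pvSplitSlash f).drop 1).take (d+1) = t0.take (d+1) := by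
          intro f hf
          rw [pv_take_succ_getD (hlt f hf), pv_take_succ_getD hd_t0, htk f hf, heq f hf]
        have hd1_t0 : d + 1 < t0.length := ht0' ▸ hall f0 List.mem_cons_self
        rw [ih (d+1) (fun f hf => Nat.lt_of_succ_lt_succ (Nat.succ_lt_succ (hall f hf))) htk'
          (by omega)]
        have hBstep : pvBDepth ((f0 :: fs').map (fun f => (pvSplitSlash f).drop 1)) t0 d (t0.length - d)
            = pvBDepth ((f0 :: fs').map (fun f => (pvSplitSlash f).drop 1)) t0 (d+1) (t0.length - (d+1)) := by
          have hfb : t0.length - d = (t0.length - (d+1)) + 1 := by omega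
          rw [hfb, pvBDepth]
          have hc1 : (((f0 :: fs').map (fun f => (pvSplitSlash f).drop 1)).all
              (fun t => decide (d + 1 < t.length))) = true := by
            rw [List.all_map]
            exact List.all_eq_true.mpr (fun f hf => by
              simp only [Function.comp_apply, decide_eq_true_eq]
              exact hall f hf)
          have hc2 : (((f0 :: fs').map (fun f => (pvSplitSlash f).drop 1)).all
              (fun t => t.getD d "" == t0.getD d "")) = true := by
            rw [List.all_map]
            exact List.all_eq_true.mpr (fun f hf => by
              simp only [Function.comp_apply]
              exact beq_iff_eq.mpr (heq f hf))
          rw [hc1, hc2]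
          simp
        rw [hBstep]
      · -- the next components disagree: both loops stop at depth d
        have hex : ∃ f, f ∈ (f0 :: fs') ∧ ((pvSplitSlash f).drop 1).getD d "" ≠ t0.getD d "" := by
          by_contra hcon
          exact heq (fun f hf => by
            by_contra h2
            exact hcon ⟨f, hf, h2⟩)
        rcases hex with ⟨fbad, hfbad, hbad⟩
        have hv : t0.getD d "" ∈ PySem.Set.ofList
            (((f0 :: fs')).map (fun f => ((pvSplitSlash f).drop 1).getD d "")) := by
          rw [PySem.Set.mem_ofList]
          exact List.mem_map.mpr ⟨f0, List.mem_cons_self, by rw [← ht0']⟩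
        have hw : ((pvSplitSlash fbad).drop 1).getD d "" ∈ PySem.Set.ofList
            (((f0 :: fs')).map (fun f => ((pvSplitSlash f).drop 1).getD d "")) := by
          rw [PySem.Set.mem_ofList]
          exact List.mem_map.mpr ⟨fbad, hfbad, rfl⟩
        have hlen1 : ((PySem.Set.ofList
            (((f0 :: fs')).map (fun f => ((pvSplitSlash f).drop 1).getD d ""))).length == 1) = false := by
          simp only [beq_eq_false_iff_ne]
          exact pv_set_two_ne hw hv hbad
        have hB : pvBDepth ((f0 :: fs').map (fun f => (pvSplitSlash f).drop 1)) t0 d (t0.length - d) = d := by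
          have hc2 : (((f0 :: fs').map (fun f => (pvSplitSlash f).drop 1)).all
              (fun t => t.getD d "" == t0.getD d "")) = false := by
            rw [List.all_map]
            exact List.all_eq_false.mpr ⟨fbad, hfbad, fun hcon => hbad (beq_iff_eq.mp (by simpa using hcon))⟩
          cases hfb : t0.length - d with
          | zero => rw [pvBDepth]
          | succ n => rw [pvBDepth, hc2]; simp
        rw [hB]
        simp only []
        rw [hlen1]
        simp

theorem pv_join_length_ge (ps : List (List Char)) :
    ps.length ≤ (PySem.Chars.join ['/'] ps).length + 1 := by
  induction ps with
  | nil => simp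
  | cons a t ih =>
    cases t with
    | nil => simp [PySem.Chars.join, List.intercalate]
    | cons b t' =>
      have : PySem.Chars.join ['/'] (a :: b :: t') = a ++ '/' :: PySem.Chars.join ['/'] (b :: t') := by
        simp [PySem.Chars.join, List.intercalate]
      rw [this]
      simp only [List.length_cons, List.length_append] at *
      omega

theorem pv_pref_zero (top : String) (t0 : List String) :
    String.ofList (pvPrefChars top t0 0) = top ++ "/" := by
  rw [← String.toList_inj, String.toList_ofList, String.toList_append, pvPrefChars]
  simp [PySem.Chars.join, List.intercalate]

theorem pv_pref_pos (top : String) (t0 : List String) (D : Nat) (hD : 0 < D) (ht0 : t0 ≠ []) :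
    String.ofList (pvPrefChars top t0 D) = top ++ "/" ++ PySem.Str.join "/" (t0.take D) ++ "/" := by
  rw [← String.toList_inj, String.toList_ofList, pvPrefChars]
  have htk : (t0.take D).map String.toList ≠ [] := by
    simp [List.take_eq_nil_iff]
    exact ⟨by omega, ht0⟩
  have : (top :: t0.take D).map String.toList = [top.toList] ++ (t0.take D).map String.toList := by
    simp
  rw [this, pv_join_append _ _ (by simp) htk]
  simp only [String.toList_append, PySem.Str.join, String.toList_ofList]
  have h2 : PySem.Chars.join ['/'] [top.toList] = top.toList := by
    simp [PySem.Chars.join, List.intercalate]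
  rw [h2]
  have h3 : ("/" : String).toList = ['/'] := rfl
  rw [h3]
  simp

theorem pv_pref_pos_ne (top : String) (t0 : List String) (D : Nat) (hD : 0 < D) (ht0 : t0 ≠ []) :
    String.ofList (pvPrefChars top t0 D) ≠ top ++ "/" := by
  intro hcon
  rw [← String.toList_inj, String.toList_ofList, String.toList_append, pvPrefChars] at hcon
  have hlen := congrArg List.length hcon
  have htk : (t0.take D).map String.toList ≠ [] := by
    simp [List.take_eq_nil_iff]
    exact ⟨by omega, ht0⟩
  have hsplit : (top :: t0.take D).map String.toList = [top.toList] ++ (t0.take D).map String.toList := by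
    simp
  rw [hsplit, pv_join_append _ _ (by simp) htk] at hlen
  have h2 : PySem.Chars.join ['/'] [top.toList] = top.toList := by
    simp [PySem.Chars.join, List.intercalate]
  rw [h2] at hlen
  have h3 : (("/" : String).toList).length = 1 := rfl
  simp at hlen

theorem pv_pertop (top : String) (fs : List String) (hne : fs ≠ [])
    (hsp : ∀ f ∈ fs, pvSplitSlash f = top :: (pvSplitSlash f).drop 1)
    (hnz : ∀ f ∈ fs, (pvSplitSlash f).drop 1 ≠ []) :
    pvAWhile ((fs.foldl (fun m f => max m f.toList.length) 0) + 1) fs (top ++ "/")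
      = (if pvBDepth (fs.map (fun f => (pvSplitSlash f).drop 1))
              ((pvSplitSlash (fs.headD "")).drop 1) 0
              ((pvSplitSlash (fs.headD "")).drop 1).length = 0
         then top ++ "/"
         else top ++ "/" ++ PySem.Str.join "/"
            (((pvSplitSlash (fs.headD "")).drop 1).take
              (pvBDepth (fs.map (fun f => (pvSplitSlash f).drop 1))
                ((pvSplitSlash (fs.headD "")).drop 1) 0
                ((pvSplitSlash (fs.headD "")).drop 1).length)) ++ "/") := by
  obtain ⟨f0, fs', rfl⟩ : ∃ f0 fs', fs = f0 :: fs' := by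
    cases fs with
    | nil => exact absurd rfl hne
    | cons a b => exact ⟨a, b, rfl⟩
  set t0 := (pvSplitSlash ((f0 :: fs').headD "")).drop 1 with ht0
  have ht0' : t0 = (pvSplitSlash f0).drop 1 := by simp [ht0]
  -- fuel is large enough: t0 has at most |f0| components
  have hf0chars : f0.toList = PySem.Chars.join ['/'] ((top :: (pvSplitSlash f0).drop 1).map String.toList) := by
    have hparts : pvSR f0.toList = (top :: (pvSplitSlash f0).drop 1).map String.toList :=
      pv_map_toList ((pvSplitSlash_eq f0).symm.trans (hsp f0 List.mem_cons_self))
    rw [← hparts, pv_join_pvSR]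
  have hlen0 : t0.length ≤ f0.toList.length := by
    have := pv_join_length_ge ((top :: (pvSplitSlash f0).drop 1).map String.toList)
    rw [← hf0chars] at this
    simp only [List.length_map, List.length_cons] at this
    rw [ht0']
    omega
  have hmax := PySem.List.le_foldl_max_nat (f0 :: fs') (fun f => f.toList.length) 0
  have hfuel : t0.length - 0 < ((f0 :: fs').foldl (fun m f => max m f.toList.length) 0) + 1 := by
    have := hmax.2 f0 List.mem_cons_self
    simp only at this
    omega
  have hstart : (top ++ "/") = String.ofList (pvPrefChars top t0 0) := (pv_pref_zero top t0).symm
  rw [hstart, pv_ML top (f0 :: fs') t0 hne ht0 hsp _ 0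
    (fun f hf => by
      have := hnz f hf
      cases h : (pvSplitSlash f).drop 1 with
      | nil => exact absurd h this
      | cons a b => simp)
    (by simp) hfuel]
  set D := pvBDepth ((f0 :: fs').map (fun f => (pvSplitSlash f).drop 1)) t0 0 (t0.length - 0) with hD
  have hDD : D = pvBDepth ((f0 :: fs').map (fun f => (pvSplitSlash f).drop 1)) t0 0 t0.length := by
    rw [hD, Nat.sub_zero]
  rw [← hDD]
  by_cases h0 : D = 0
  · rw [if_pos h0, h0, pv_pref_zero]
  · rw [if_neg h0, pv_pref_zero]
    have ht0ne : t0 ≠ [] := ht0' ▸ hnz f0 List.mem_cons_self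
    exact pv_pref_pos top t0 D (Nat.pos_of_ne_zero h0) ht0ne

theorem pv_dictA_getD (el : List String) (c : String) :
    (el.foldl (fun d p => d.modify ((pvSplitSlash p).headD "") [] (fun fs => fs ++ [p]))
        (PySem.Dict.empty : PySem.Dict String (List String))).getD c []
      = el.filter (fun p => (pvSplitSlash p).headD "" == c) := by
  have h1 : el.foldl (fun d p => d.modify ((pvSplitSlash p).headD "") [] (fun fs => fs ++ [p]))
        (PySem.Dict.empty : PySem.Dict String (List String))
      = (el.map (fun p => ((pvSplitSlash p).headD "", p))).foldl
          (fun d q => d.modify q.1 [] (fun fs => fs ++ [q.2])) PySem.Dict.empty := by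
    rw [List.foldl_map]
  rw [h1, PySem.Dict.getD_foldl_modify_append, PySem.Dict.getD_empty, List.filter_map]
  simp [List.map_map, Function.comp_def]

theorem pv_dictB_getD (el : List String) (c : String) :
    (el.foldl (fun d p => d.modify ((pvSplitSlash p).headD "") [] (fun ts => ts ++ [(pvSplitSlash p).drop 1]))
        (PySem.Dict.empty : PySem.Dict String (List (List String)))).getD c []
      = (el.filter (fun p => (pvSplitSlash p).headD "" == c)).map (fun p => (pvSplitSlash p).drop 1) := by
  have h1 : el.foldl (fun d p => d.modify ((pvSplitSlash p).headD "") [] (fun ts => ts ++ [(pvSplitSlash p).drop 1]))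
        (PySem.Dict.empty : PySem.Dict String (List (List String)))
      = (el.map (fun p => ((pvSplitSlash p).headD "", (pvSplitSlash p).drop 1))).foldl
          (fun d q => d.modify q.1 [] (fun ts => ts ++ [q.2])) PySem.Dict.empty := by
    rw [List.foldl_map]
  rw [h1, PySem.Dict.getD_foldl_modify_append, PySem.Dict.getD_empty, List.filter_map]
  simp [List.map_map, Function.comp_def]


theorem pv_main (paths : List String) :
    find_passthrough_prefixes_py paths = find_passthrough_prefixes_py_alt paths := by
  simp only [find_passthrough_prefixes_py, find_passthrough_prefixes_py_alt]
  rw [PySem.List.foldl_ite_eq_foldl_filter (p := fun p => (pvSplitSlash p).length > 1),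
    PySem.List.foldl_ite_eq_foldl_filter (p := fun p => (pvSplitSlash p).length > 1)]
  set el := paths.filter (fun p => decide ((pvSplitSlash p).length > 1)) with hel
  set key : String → String := fun p => (pvSplitSlash p).headD "" with hkey
  -- both dicts have the same key list, in the same order
  have hkA : (el.foldl (fun d p => d.modify (key p) [] (fun fs => fs ++ [p]))
      (PySem.Dict.empty : PySem.Dict String (List String))).keys = PySem.Set.ofList (el.map key) := by
    rw [PySem.Dict.keys_foldl_modify_key el key [] (fun _ p => fun fs => fs ++ [p]),
      PySem.Dict.keys_empty, PySem.Set.update_nil_left]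
  have hkB : (el.foldl (fun d p => d.modify (key p) [] (fun ts => ts ++ [(pvSplitSlash p).drop 1]))
      (PySem.Dict.empty : PySem.Dict String (List (List String)))).keys = PySem.Set.ofList (el.map key) := by
    rw [PySem.Dict.keys_foldl_modify_key el key [] (fun _ p => fun ts => ts ++ [(pvSplitSlash p).drop 1]),
      PySem.Dict.keys_empty, PySem.Set.update_nil_left]
  have hiA := PySem.Dict.items_eq_map_keys
    (el.foldl (fun d p => d.modify (key p) [] (fun fs => fs ++ [p])) PySem.Dict.empty)
    (by rw [hkA]; exact PySem.Set.nodup_ofList _) []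
  have hiB := PySem.Dict.items_eq_map_keys
    (el.foldl (fun d p => d.modify (key p) [] (fun ts => ts ++ [(pvSplitSlash p).drop 1])) PySem.Dict.empty)
    (by rw [hkB]; exact PySem.Set.nodup_ofList _) []
  rw [hkA] at hiA
  rw [hkB] at hiB
  rw [hiA, hiB]
  rw [List.foldl_map, List.foldl_map]
  congr 1
  apply PySem.List.foldl_congr_mem
  intro pfs k hk
  simp only
  rw [pv_dictA_getD, pv_dictB_getD]
  set fsk := el.filter (fun p => key p == k) with hfsk
  -- the group for k is nonempty and every member splits as k :: tail with a nonempty tail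
  have hmem : ∀ f ∈ fsk, pvSplitSlash f = k :: (pvSplitSlash f).drop 1 ∧ (pvSplitSlash f).drop 1 ≠ [] := by
    intro f hf
    rcases List.mem_filter.mp hf with ⟨hfe, hfkey⟩
    rcases List.mem_filter.mp hfe with ⟨_, hlen⟩
    rw [decide_eq_true_eq] at hlen
    have hkeq : key f = k := beq_iff_eq.mp hfkey
    cases hps : pvSplitSlash f with
    | nil => rw [hps] at hlen; simp at hlen
    | cons a t =>
      have ha : a = k := by
        simp only [hkey] at hkeq
        rw [hps] at hkeq
        simpa using hkeq
      have ht : t ≠ [] := by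
        rw [hps] at hlen
        simp at hlen
        exact List.ne_nil_of_length_pos hlen
      constructor
      · simp [ha]
      · simpa using ht
  have hne : fsk ≠ [] := by
    rcases List.mem_map.mp ((PySem.Set.mem_ofList (el.map key) k).mp hk) with ⟨p, hp, hpk⟩
    exact List.ne_nil_of_mem (List.mem_filter.mpr ⟨hp, beq_iff_eq.mpr hpk⟩)
  have hPT := pv_pertop k fsk hne (fun f hf => (hmem f hf).1) (fun f hf => (hmem f hf).2)
  -- B's head tail equals the head file's tail
  rcases List.exists_cons_of_ne_nil hne with ⟨a0, b0, hab⟩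
  have hhead : (fsk.map (fun p => (pvSplitSlash p).drop 1)).headD [] = (pvSplitSlash (fsk.headD "")).drop 1 := by
    rw [hab]; simp
  rw [hPT, hhead]
  by_cases h0 : pvBDepth (fsk.map (fun f => (pvSplitSlash f).drop 1))
      ((pvSplitSlash (fsk.headD "")).drop 1) 0 ((pvSplitSlash (fsk.headD "")).drop 1).length = 0
  · rw [if_pos h0, if_neg (fun hcon => hcon rfl), if_neg (fun hcon => hcon h0)]
  · rw [if_neg h0, if_pos h0]
    rw [if_pos ?_]
    have ht0ne : (pvSplitSlash (fsk.headD "")).drop 1 ≠ [] := by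
      rw [hab]
      simpa using (hmem a0 (hab ▸ List.mem_cons_self)).2
    rw [← pv_pref_pos k _ _ (Nat.pos_of_ne_zero h0) ht0ne]
    exact pv_pref_pos_ne k _ _ (Nat.pos_of_ne_zero h0) ht0ne

-- ===== VERDICT (by name: the statement is the Claim_ definition above) =====
theorem find_passthrough_prefixes_py_spec : Claim_equal_find_passthrough_prefixes_py := by
  intro paths _
  exact pv_main paths
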